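-- pv_equiv track=rewrite | github.com/fhtw3b/websiteone | ds1.py | alternance
-- ===== SOURCE A (Python) =====
-- def alternance(s1: str, s2: str, n: int) -> str :
-- 	"""
-- 	pre-cond:
-- 	post-cond: retourne une chaine composée de n alternances de s1 et s2
-- 	"""
-- 	res = ""
-- 	i = 0
-- 	while i < n:
-- 		if i % 2 == 0:
-- 			res += s1
-- 		else:
-- 			res += s2
-- 		i += 1
-- 	return res
-- ===== SOURCE B (Python) =====
-- def alternance(s1: str, s2: str, n: int) -> str:
--     if n <= 0:
--         return ""
--     return (s1 + s2) * (n // 2) + s1 * (n % 2)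
-- ===== Notes on version B (the rewrite author's own statement) =====
-- stated objective: simpler
-- what changed: Replaced the incremental while-loop with per-index parity branch by a closed-form expression: repeat the pair (s1+s2) n//2 times and append s1 once more when n is odd.
import Mathlib
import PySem

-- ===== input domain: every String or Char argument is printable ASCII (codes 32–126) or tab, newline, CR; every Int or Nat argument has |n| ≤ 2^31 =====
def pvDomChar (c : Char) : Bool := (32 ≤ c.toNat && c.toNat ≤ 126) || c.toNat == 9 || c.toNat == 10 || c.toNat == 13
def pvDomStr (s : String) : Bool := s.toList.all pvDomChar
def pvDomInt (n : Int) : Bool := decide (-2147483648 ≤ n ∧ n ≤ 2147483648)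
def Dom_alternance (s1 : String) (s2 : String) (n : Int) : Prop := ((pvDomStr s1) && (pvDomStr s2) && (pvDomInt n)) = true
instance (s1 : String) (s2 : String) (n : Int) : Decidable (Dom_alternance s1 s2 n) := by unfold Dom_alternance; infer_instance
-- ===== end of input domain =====

-- B replaces A's while-loop with a closed form: (s1+s2) repeated n//2 times plus s1 if n is odd (simpler; return value only).


-- ===== PORT A =====
-- while i < n loop, fuel = number of remaining iterations (n - i), state (i, res)
def alternanceLoop (s1 s2 : String) : Nat → Nat → String → String
  | 0, _, res => res
  | k + 1, i, res => alternanceLoop s1 s2 k (i + 1) (res ++ (if i % 2 == 0 then s1 else s2))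

def alternance (s1 : String) (s2 : String) (n : Int) : String :=
  alternanceLoop s1 s2 n.toNat 0 ""

-- ===== PORT B =====
-- Python's 's * k' for k ≥ 0
def repStr (s : String) : Nat → String
  | 0 => ""
  | k + 1 => s ++ repStr s k

def alternance_alt (s1 : String) (s2 : String) (n : Int) : String :=
  if n ≤ 0 then ""
  else repStr (s1 ++ s2) (PySem.Int.floordiv n 2).toNat ++ repStr s1 (PySem.Int.mod n 2).toNat

-- ===== PRECONDITION & SPEC =====
def Spec_alternance (s1 : String) (s2 : String) (n : Int) (out : String) : Prop := out = alternance_alt s1 s2 n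
instance (s1 : String) (s2 : String) (n : Int) (out : String) : Decidable (Spec_alternance s1 s2 n out) := by unfold Spec_alternance; infer_instance

-- ===== CLAIM (what is proved, stated in full; the proofs are below) =====
def Claim_equal_alternance : Prop := ∀ (s1 : String) (s2 : String) (n : Int), Dom_alternance s1 s2 n → Spec_alternance s1 s2 n (alternance s1 s2 n)

-- ===== LEMMAS AND PROOFS =====
theorem loop_step (s1 s2 : String) (k i : Nat) (res : String) :
    alternanceLoop s1 s2 (k + 1) i res
      = alternanceLoop s1 s2 k (i + 1) (res ++ if i % 2 == 0 then s1 else s2) := rfl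

theorem loop_even (s1 s2 : String) (m : Nat) : ∀ (i : Nat) (res : String), i % 2 = 0 →
    alternanceLoop s1 s2 (2 * m) i res = res ++ repStr (s1 ++ s2) m := by
  induction m with
  | zero => intro i res _; simp [alternanceLoop, repStr]
  | succ m ih =>
    intro i res hi
    have h2 : 2 * (m + 1) = (2 * m) + 1 + 1 := by ring
    rw [h2, loop_step, loop_step]
    have h1 : (i % 2 == 0) = true := by simp [hi]
    have h3 : ((i + 1) % 2 == 0) = false := by simp; omega
    rw [h1, h3]
    simp only [if_true, Bool.false_eq_true, if_false]
    rw [ih (i + 1 + 1) _ (by omega)]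
    simp [repStr, String.append_assoc]

theorem loop_odd (s1 s2 : String) (m : Nat) : ∀ (i : Nat) (res : String), i % 2 = 0 →
    alternanceLoop s1 s2 (2 * m + 1) i res = res ++ repStr (s1 ++ s2) m ++ s1 := by
  induction m with
  | zero =>
    intro i res hi
    rw [loop_step]
    have h1 : (i % 2 == 0) = true := by simp [hi]
    rw [h1]
    simp [alternanceLoop, repStr]
  | succ m ih =>
    intro i res hi
    have h2 : 2 * (m + 1) + 1 = (2 * m + 1) + 1 + 1 := by ring
    rw [h2, loop_step, loop_step]
    have h1 : (i % 2 == 0) = true := by simp [hi]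
    have h3 : ((i + 1) % 2 == 0) = false := by simp; omega
    rw [h1, h3]
    simp only [if_true, Bool.false_eq_true, if_false]
    rw [ih (i + 1 + 1) _ (by omega)]
    simp [repStr, String.append_assoc]

-- ===== VERDICT (by name: the statement is the Claim_ definition above) =====
theorem alternance_spec : Claim_equal_alternance := by
  intro s1 s2 n _
  unfold Spec_alternance alternance alternance_alt
  by_cases hn : n ≤ 0
  · have : n.toNat = 0 := by omega
    simp [this, hn, alternanceLoop]
  · have hpos : 0 < n := by omega
    rw [if_neg hn]
    rw [PySem.Int.floordiv_eq_ediv_of_pos (by norm_num),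
        PySem.Int.mod_eq_emod_of_pos (by norm_num)]
    have hd : (n / 2).toNat = n.toNat / 2 := by omega
    have hm : (n % 2).toNat = n.toNat % 2 := by omega
    rw [hd, hm]
    rcases Nat.even_or_odd n.toNat with ⟨m, hme⟩ | ⟨m, hmo⟩
    · have h1 : n.toNat = 2 * m := by omega
      have h2 : n.toNat / 2 = m := by omega
      have h3 : n.toNat % 2 = 0 := by omega
      rw [h2, h3, h1]
      rw [loop_even s1 s2 m 0 "" (by omega)]
      simp [repStr]
    · have h1 : n.toNat = 2 * m + 1 := by omega
      have h2 : n.toNat / 2 = m := by omega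
      have h3 : n.toNat % 2 = 1 := by omega
      rw [h2, h3, h1]
      rw [loop_odd s1 s2 m 0 "" (by omega)]
      simp [repStr]
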